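-- pv_equiv track=rewrite | github.com/GabrielIslas/Third-Quarter | DataStructures/Unit 2/arraySum.py | dimensionCheck
-- ===== SOURCE A (Python) =====
-- def dimensionCheck(arr1, arr2):
--     # same amount of rows
--     if len(arr1) != len(arr2):
--         return False
--     # rows are equal size for both arrays (wouldn't be an array then)
--     for row1 in arr1:
--         if len(row1) != len(arr1[0]):
--             return False
--     for row2 in arr2:
--         if len(row2) != len(arr2[0]):
--             return False
--     # checking rows between arrays are the same size
--     for row1 in arr1:
--         for row2 in arr2:
--             if len(row1) != len(row2):
--                 return False
--     return True
-- ===== SOURCE B (Python) =====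
-- def dimensionCheck(arr1, arr2):
--     if len(arr1) != len(arr2):
--         return False
--     lens1 = {len(r) for r in arr1}
--     lens2 = {len(r) for r in arr2}
--     return len(lens1) <= 1 and len(lens2) <= 1 and lens1 == lens2
-- ===== Notes on version B (the rewrite author's own statement) =====
-- stated objective: simpler
-- what changed: Replaces the two uniformity scans and the quadratic row-by-row cross comparison with one pass per array that collects the set of distinct row widths, then decides by set cardinality (<=1 per array) and set equality.
import Mathlib
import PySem

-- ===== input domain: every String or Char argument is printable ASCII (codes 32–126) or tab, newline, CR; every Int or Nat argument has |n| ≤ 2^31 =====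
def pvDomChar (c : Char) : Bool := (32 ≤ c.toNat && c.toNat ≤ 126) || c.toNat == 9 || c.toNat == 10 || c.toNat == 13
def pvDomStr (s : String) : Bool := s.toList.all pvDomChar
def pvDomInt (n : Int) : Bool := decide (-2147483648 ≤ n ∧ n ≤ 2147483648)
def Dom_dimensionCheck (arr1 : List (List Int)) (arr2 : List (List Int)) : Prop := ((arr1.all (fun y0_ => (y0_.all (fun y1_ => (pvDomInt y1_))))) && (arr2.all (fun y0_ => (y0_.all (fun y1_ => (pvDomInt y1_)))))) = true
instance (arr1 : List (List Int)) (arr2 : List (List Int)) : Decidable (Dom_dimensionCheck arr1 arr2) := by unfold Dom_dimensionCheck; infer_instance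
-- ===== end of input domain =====

-- B replaces A's uniformity scans and quadratic cross comparison by collecting the set of
-- distinct row widths per array and comparing cardinalities and sets (objective: simpler).

-- ===== PORT A =====
-- 'for row in arr: if len(row) != w: return False'
def pvRowsUniform (rows : List (List Int)) (w : Nat) : Bool :=
  match rows with
  | [] => true
  | r :: rs => if r.length ≠ w then false else pvRowsUniform rs w

-- the inner loop 'for row2 in arr2: if len(row1) != len(row2): return False'
def pvCrossInner (w : Nat) (rows : List (List Int)) : Bool :=
  match rows with
  | [] => true
  | r :: rs => if w ≠ r.length then false else pvCrossInner w rs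

-- the outer loop 'for row1 in arr1: …'
def pvCrossOuter (xs ys : List (List Int)) : Bool :=
  match xs with
  | [] => true
  | r :: rs => if pvCrossInner r.length ys then pvCrossOuter rs ys else false

def dimensionCheck (arr1 : List (List Int)) (arr2 : List (List Int)) : Bool :=
  if arr1.length ≠ arr2.length then false
  else
    -- 'len(arr1[0])' is only evaluated inside the loop, i.e. when the array is non-empty
    (match arr1 with
     | [] => true
     | r0 :: _ => pvRowsUniform arr1 r0.length) &&
    (match arr2 with
     | [] => true
     | r0 :: _ => pvRowsUniform arr2 r0.length) &&
    pvCrossOuter arr1 arr2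

-- ===== PORT B =====
def dimensionCheck_alt (arr1 : List (List Int)) (arr2 : List (List Int)) : Bool :=
  if arr1.length ≠ arr2.length then false
  else
    let lens1 : PySem.Set Int := PySem.Set.ofList (arr1.map (fun r => (r.length : Int)))
    let lens2 : PySem.Set Int := PySem.Set.ofList (arr2.map (fun r => (r.length : Int)))
    decide (PySem.Set.len lens1 ≤ 1) && decide (PySem.Set.len lens2 ≤ 1) &&
      PySem.Set.equal lens1 lens2

-- ===== PRECONDITION & SPEC =====
def Spec_dimensionCheck (arr1 : List (List Int)) (arr2 : List (List Int)) (out : Bool) : Prop := out = dimensionCheck_alt arr1 arr2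
instance (arr1 : List (List Int)) (arr2 : List (List Int)) (out : Bool) : Decidable (Spec_dimensionCheck arr1 arr2 out) := by unfold Spec_dimensionCheck; infer_instance

-- ===== CLAIM (what is proved, stated in full; the proofs are below) =====
def Claim_equal_dimensionCheck : Prop := ∀ (arr1 : List (List Int)) (arr2 : List (List Int)), Dom_dimensionCheck arr1 arr2 → Spec_dimensionCheck arr1 arr2 (dimensionCheck arr1 arr2)

-- ===== LEMMAS AND PROOFS =====

theorem pvRowsUniform_iff (rows : List (List Int)) (w : Nat) :
    pvRowsUniform rows w = true ↔ ∀ r ∈ rows, r.length = w := by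
  induction rows with
  | nil => simp [pvRowsUniform]
  | cons r rs ih =>
    simp only [pvRowsUniform]
    by_cases h : r.length = w <;> simp [h, ih]

theorem pvCrossInner_iff (w : Nat) (rows : List (List Int)) :
    pvCrossInner w rows = true ↔ ∀ r ∈ rows, w = r.length := by
  induction rows with
  | nil => simp [pvCrossInner]
  | cons r rs ih =>
    simp only [pvCrossInner]
    by_cases h : w = r.length
    · subst h; simp [ih]
    · simp [h]

theorem pvCrossOuter_iff (xs ys : List (List Int)) :
    pvCrossOuter xs ys = true ↔ ∀ r1 ∈ xs, ∀ r2 ∈ ys, r1.length = r2.length := by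
  induction xs with
  | nil => simp [pvCrossOuter]
  | cons r rs ih =>
    simp only [pvCrossOuter]
    by_cases h : pvCrossInner r.length ys = true
    · rw [if_pos h, ih]
      rw [pvCrossInner_iff] at h
      simp only [List.mem_cons]
      constructor
      · rintro hall r1 (rfl | hr1) r2 hr2
        · exact h r2 hr2
        · exact hall r1 hr1 r2 hr2
      · intro hall r1 hr1 r2 hr2
        exact hall r1 (Or.inr hr1) r2 hr2
    · rw [if_neg h]
      refine ⟨fun hf => absurd hf (by simp), fun hall => absurd ?_ h⟩
      rw [pvCrossInner_iff]
      intro r2 hr2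
      exact hall r (List.mem_cons_self ..) r2 hr2

-- A's per-array uniformity check (against arr[0]) ↔ all row widths pairwise equal
theorem pvUniform_iff (arr : List (List Int)) :
    (match arr with
     | [] => true
     | r0 :: _ => pvRowsUniform arr r0.length) = true ↔
    ∀ a ∈ arr, ∀ b ∈ arr, a.length = b.length := by
  cases arr with
  | nil => simp
  | cons r0 rs =>
    simp only [pvRowsUniform_iff]
    constructor
    · intro h a ha b hb
      rw [h a ha, h b hb]
    · intro h a ha
      exact h a ha r0 (List.mem_cons_self ..)

-- set of widths has ≤ 1 element ↔ all widths pairwise equal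
theorem pvLen_le_one_iff (arr : List (List Int)) :
    PySem.Set.len (PySem.Set.ofList (arr.map (fun r => (r.length : Int)))) ≤ 1 ↔
    ∀ a ∈ arr, ∀ b ∈ arr, a.length = b.length := by
  have hnd := PySem.Set.nodup_ofList (xs := arr.map (fun r => (r.length : Int)))
  have hmem : ∀ x, x ∈ PySem.Set.ofList (arr.map (fun r => (r.length : Int))) ↔
      ∃ r ∈ arr, (r.length : Int) = x := by
    intro x; rw [PySem.Set.mem_ofList]; simp
  constructor
  · intro hle a ha b hb
    cases hS : PySem.Set.ofList (arr.map (fun r => (r.length : Int))) with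
    | nil =>
      exfalso
      have : (a.length : Int) ∈ ([] : List Int) := by
        rw [← hS, hmem]; exact ⟨a, ha, rfl⟩
      simp at this
    | cons x xs =>
      have hxs : xs = [] := by
        rw [hS] at hle
        simp only [PySem.Set.len, List.length_cons] at hle
        have hx0 : xs.length = 0 := by omega
        exact List.length_eq_zero_iff.mp hx0
      subst hxs
      have h1 : (a.length : Int) ∈ [x] := by rw [← hS, hmem]; exact ⟨a, ha, rfl⟩
      have h2 : (b.length : Int) ∈ [x] := by rw [← hS, hmem]; exact ⟨b, hb, rfl⟩
      simp only [List.mem_singleton] at h1 h2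
      have := h1.trans h2.symm
      exact_mod_cast this
  · intro h
    cases hS : PySem.Set.ofList (arr.map (fun r => (r.length : Int))) with
    | nil => simp [PySem.Set.len]
    | cons x xs =>
      cases xs with
      | nil => simp [PySem.Set.len]
      | cons y ys =>
        exfalso
        rw [hS] at hnd hmem
        have hx := (hmem x).mp (List.mem_cons_self ..)
        have hy := (hmem y).mp (List.mem_cons_of_mem _ (List.mem_cons_self ..))
        obtain ⟨rx, hrx, hrx'⟩ := hx
        obtain ⟨ry, hry, hry'⟩ := hy
        have : x = y := by rw [← hrx', ← hry', h rx hrx ry hry]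
        simp [this] at hnd
  
-- given uniformity of both arrays and equal row counts, set equality ↔ A's cross check
theorem pvEqual_iff (arr1 arr2 : List (List Int))
    (hlen : arr1.length = arr2.length)
    (h1 : ∀ a ∈ arr1, ∀ b ∈ arr1, a.length = b.length)
    (h2 : ∀ a ∈ arr2, ∀ b ∈ arr2, a.length = b.length) :
    PySem.Set.equal (PySem.Set.ofList (arr1.map (fun r => (r.length : Int))))
        (PySem.Set.ofList (arr2.map (fun r => (r.length : Int)))) = true ↔
    ∀ r1 ∈ arr1, ∀ r2 ∈ arr2, r1.length = r2.length := by
  rw [PySem.Set.equal_iff]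
  simp only [PySem.Set.mem_ofList, List.mem_map]
  constructor
  · intro h r1 hr1 r2 hr2
    obtain ⟨r', hr', hw⟩ := (h ((r1.length : Int))).mp ⟨r1, hr1, rfl⟩
    have := h2 r' hr' r2 hr2
    omega
  · intro h x
    constructor
    · rintro ⟨r1, hr1, rfl⟩
      cases arr2 with
      | nil => exact absurd hlen (by cases arr1 <;> simp_all)
      | cons s ss => exact ⟨s, List.mem_cons_self .., by rw [h r1 hr1 s (List.mem_cons_self ..)]⟩
    · rintro ⟨r2, hr2, rfl⟩
      cases arr1 with
      | nil => exact absurd hlen (by cases arr2 <;> simp_all)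
      | cons s ss => exact ⟨s, List.mem_cons_self .., by rw [h s (List.mem_cons_self ..) r2 hr2]⟩

-- ===== VERDICT (by name: the statement is the Claim_ definition above) =====
theorem dimensionCheck_spec : Claim_equal_dimensionCheck := by
  intro arr1 arr2 _
  unfold Spec_dimensionCheck dimensionCheck dimensionCheck_alt
  by_cases hlen : arr1.length = arr2.length
  · rw [if_neg (by simp [hlen]), if_neg (by simp [hlen])]
    rw [Bool.eq_iff_iff]
    simp only [Bool.and_eq_true, decide_eq_true_eq]
    rw [pvUniform_iff, pvUniform_iff, pvCrossOuter_iff, pvLen_le_one_iff, pvLen_le_one_iff]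
    constructor
    · rintro ⟨⟨h1, h2⟩, hc⟩
      exact ⟨⟨h1, h2⟩, (pvEqual_iff arr1 arr2 hlen h1 h2).mpr hc⟩
    · rintro ⟨⟨h1, h2⟩, he⟩
      exact ⟨⟨h1, h2⟩, (pvEqual_iff arr1 arr2 hlen h1 h2).mp he⟩
  · rw [if_pos (by simpa using hlen), if_pos (by simpa using hlen)]
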